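-- pv_equiv track=rewrite | github.com/zikram013/Titancod | pythonProject/Titancod/quimica.py | descodificar
-- ===== SOURCE A (Python) =====
-- def descodificar(cod):
--     codli=list()
--     c=list(cod)
--     for i in range(len(cod)-1):
--        if cod[i]=="p" and cod[i-1]==cod[i+1]:
--         codli.append(i)
--         codli.append(i+1)
--     j=0
--     for i in codli:
--         c.pop(int(i)-j)
--         j+=1
--
--     desco=''.join(str(e)for e in c)
--     return desco
-- ===== SOURCE B (Python) =====
-- def descodificar(cod):
--     n = len(cod)
--     matched = {i for i in range(n - 1) if cod[i] == "p" and cod[i - 1] == cod[i + 1]}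
--     return ''.join(ch for k, ch in enumerate(cod) if k not in matched and k - 1 not in matched)
-- ===== Notes on version B (the rewrite author's own statement) =====
-- stated objective: simpler
-- what changed: Replaces A's two-phase append-indices-then-pop-with-shifting-offset loops by one set of matched positions and a single index filter over enumerate.
-- outside the precondition, e.g. on descodificar('ppppa'): A returns 'a', B returns 'pa'; on descodificar('ppp'): A raises IndexError, B returns ''
import Mathlib
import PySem

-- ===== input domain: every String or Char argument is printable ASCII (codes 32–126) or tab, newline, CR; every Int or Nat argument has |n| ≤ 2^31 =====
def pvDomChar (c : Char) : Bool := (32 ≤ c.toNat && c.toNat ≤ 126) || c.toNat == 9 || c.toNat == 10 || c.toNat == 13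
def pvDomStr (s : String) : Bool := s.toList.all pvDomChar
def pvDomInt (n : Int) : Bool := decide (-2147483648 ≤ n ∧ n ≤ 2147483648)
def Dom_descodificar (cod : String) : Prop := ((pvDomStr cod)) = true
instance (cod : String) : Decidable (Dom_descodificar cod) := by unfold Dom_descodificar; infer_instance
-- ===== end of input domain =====

-- B replaces A's append-indices-then-pop-with-shifting-offset loops by one set of
-- matched positions and a single index filter (objective: simpler).


-- ===== PORT A =====
-- c.pop(int(i)-j); j+=1  (a pop with an out-of-range index is Python's IndexError:
-- the 'none' branch keeps the list, and Pre_ excludes those inputs)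
def popStep (st : List Char × Int) (i : Int) : List Char × Int :=
  match PySem.List.pop? st.1 (i - st.2) with
  | some r => (r.2, st.2 + 1)
  | none => (st.1, st.2 + 1)

def descodificar (cod : String) : String :=
  let c : List Char := cod.toList
  let codli : List Int :=
    (PySem.List.pyRange 0 (PySem.Str.len cod - 1) 1).foldl
      (fun acc i =>
        if PySem.Str.pyGet? cod i == some 'p' &&
           PySem.Str.pyGet? cod (i - 1) == PySem.Str.pyGet? cod (i + 1)
        then (acc ++ [i]) ++ [i + 1] else acc) []
  let fin := codli.foldl popStep (c, 0)
  String.mk fin.1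

-- ===== PORT B =====
def descodificar_alt (cod : String) : String :=
  let n : Int := PySem.Str.len cod
  let matched : PySem.Set Int :=
    PySem.Set.ofList
      ((PySem.List.pyRange 0 (n - 1) 1).filter
        (fun i =>
          PySem.Str.pyGet? cod i == some 'p' &&
          PySem.Str.pyGet? cod (i - 1) == PySem.Str.pyGet? cod (i + 1)))
  String.mk
    (((PySem.List.enumerate cod.toList 0).filter
        (fun kc => !(PySem.Set.contains matched kc.1) &&
                   !(PySem.Set.contains matched (kc.1 - 1)))).map (·.2))

-- ===== PRECONDITION & SPEC =====
-- cod[i]=="p" and cod[i-1]==cod[i+1], the match condition of both programs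
def matchAt (cod : String) (i : Int) : Bool :=
  PySem.Str.pyGet? cod i == some 'p' &&
  PySem.Str.pyGet? cod (i - 1) == PySem.Str.pyGet? cod (i + 1)

-- Pre_ excludes strings with two ADJACENT match positions (overlapping 'pXp' patterns):
-- there A's duplicated pop indices either raise IndexError or produce a value by
-- accidental negative-index wraparound — an unspecified corner no caller would rely on.
def Pre_descodificar (cod : String) : Prop :=
  ((PySem.List.pyRange 0 (PySem.Str.len cod - 2) 1).all
    (fun i => !(matchAt cod i && matchAt cod (i + 1)))) = true
instance (cod : String) : Decidable (Pre_descodificar cod) := by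
  unfold Pre_descodificar; infer_instance

def pvWitness_descodificar : String := "xapay"

def Spec_descodificar (cod : String) (out : String) : Prop := out = descodificar_alt cod
instance (cod : String) (out : String) : Decidable (Spec_descodificar cod out) := by
  unfold Spec_descodificar; infer_instance

-- ===== CLAIM (what is proved, stated in full; the proofs are below) =====
def Claim_equal_descodificar : Prop :=
  ∀ (cod : String), Dom_descodificar cod → Pre_descodificar cod →
    Spec_descodificar cod (descodificar cod)

-- ===== LEMMAS AND PROOFS =====

-- keep the elements whose (0-based) position k satisfies p k
def keepIdx {α : Type} (p : Int → Bool) : List α → List α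
  | [] => []
  | a :: t => (if p 0 then [a] else []) ++ keepIdx (fun k => p (k + 1)) t

theorem keepIdx_congr {α : Type} {p q : Int → Bool} (l : List α)
    (h : ∀ k : Int, 0 ≤ k → p k = q k) : keepIdx p l = keepIdx q l := by
  induction l generalizing p q with
  | nil => rfl
  | cons a t ih =>
      simp only [keepIdx, h 0 le_rfl]
      rw [ih (fun k hk => h (k + 1) (by omega))]

theorem keepIdx_true {α : Type} (l : List α) (p : Int → Bool)
    (h : ∀ k : Int, 0 ≤ k → p k = true) : keepIdx p l = l := by
  induction l generalizing p with
  | nil => rfl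
  | cons a t ih => simp [keepIdx, h 0 le_rfl, ih _ (fun k hk => h (k + 1) (by omega))]

theorem contains_eq_false_of_forall_lt (tl : List Int) (y : Int)
    (h : ∀ w ∈ tl, y < w) : tl.contains y = false := by
  induction tl with
  | nil => rfl
  | cons w ws ih =>
      have h1 : y ≠ w := ne_of_lt (h w (by simp))
      simp only [List.contains_cons, Bool.or_eq_false_iff]
      exact ⟨by simpa using h1, ih (fun w hw => h w (by simp [hw]))⟩

theorem keepIdx_eraseIdx {α : Type} (l : List α) (m : Nat) (hm : m < l.length)
    (p : Int → Bool) :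
    keepIdx p (l.eraseIdx m) =
      keepIdx (fun k => if k < (m : Int) then p k
                        else if k = (m : Int) then false else p (k - 1)) l := by
  induction l generalizing m p with
  | nil => simp at hm
  | cons a t ih =>
      cases m with
      | zero =>
          simp only [List.eraseIdx_cons_zero, keepIdx, Nat.cast_zero]
          simp only [if_true]
          exact keepIdx_congr t (fun k hk => by
            rw [if_neg (by omega), if_neg (by omega)]
            congr 1
            omega)
      | succ m =>
          simp only [List.eraseIdx_cons_succ, keepIdx]
          rw [ih m (by simpa using hm)]
          have hc : (0 : Int) < ((m + 1 : Nat) : Int) := by push_cast; omega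
          simp only [if_pos hc]
          congr 1
          exact keepIdx_congr t (fun k hk => by
              by_cases h1 : k < (m : Int)
              · rw [if_pos h1, if_pos (by push_cast; omega)]
              · by_cases h2 : k = (m : Int)
                · rw [if_neg h1, if_pos h2, if_neg (by push_cast; omega),
                    if_pos (by push_cast; omega)]
                · rw [if_neg h1, if_neg h2, if_neg (by push_cast; omega),
                    if_neg (by push_cast; omega)]
                  congr 1
                  omega)

-- the pop loop of A removes exactly the positions listed in vs
theorem pops_spec (vs : List Int) (xs : List Char) (j : Int)
    (hsort : vs.Pairwise (· < ·))
    (hbound : ∀ v ∈ vs, j ≤ v ∧ v < j + xs.length) :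
    (vs.foldl popStep (xs, j)).1 = keepIdx (fun k => !(vs.contains (k + j))) xs := by
  induction vs generalizing xs j with
  | nil =>
      simp only [List.foldl_nil]
      exact (keepIdx_true xs _ (by simp)).symm
  | cons v tl ih =>
      obtain ⟨hjv, hvlen⟩ := hbound v (by simp)
      have hmem : ∀ w ∈ tl, v < w := fun w hw => List.rel_of_pairwise_cons hsort hw
      have hnn : 0 ≤ v - j := by omega
      have hlt : (v - j).toNat < xs.length := by omega
      have hpop : PySem.List.pop? xs (v - j) =
          some (xs[(v - j).toNat]'hlt, xs.eraseIdx (v - j).toNat) := by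
        conv_lhs => rw [show (v - j) = (((v - j).toNat : Nat) : Int) from by omega]
        exact PySem.List.pop?_natCast xs (v - j).toNat hlt
      have hstep : popStep (xs, j) v = (xs.eraseIdx (v - j).toNat, j + 1) := by
        simp only [popStep, hpop]
      rw [List.foldl_cons, hstep]
      rw [ih (xs.eraseIdx (v - j).toNat) (j + 1) hsort.of_cons
        (fun w hw => by
          have h1 := (hbound w (by simp [hw])).2
          have h2 := hmem w hw
          have hlen' : (xs.eraseIdx (v - j).toNat).length = xs.length - 1 :=
            List.length_eraseIdx_of_lt hlt
          rw [hlen']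
          constructor <;> omega)]
      rw [keepIdx_eraseIdx xs _ hlt]
      exact keepIdx_congr xs (fun k hk => by
        by_cases h1 : k < (((v - j).toNat : Nat) : Int)
        · rw [if_pos h1]
          have e1 : tl.contains (k + (j + 1)) = false :=
            contains_eq_false_of_forall_lt tl _ (fun w hw => by
              have := hmem w hw; omega)
          have e2 : (v :: tl).contains (k + j) = false := by
            rw [List.contains_cons, contains_eq_false_of_forall_lt tl _
              (fun w hw => by have := hmem w hw; omega)]
            rw [Bool.or_false, beq_eq_false_iff_ne]
            omega
          rw [e1, e2]
        · by_cases h2 : k = (((v - j).toNat : Nat) : Int)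
          · rw [if_neg h1, if_pos h2]
            have he : (v :: tl).contains (k + j) = true := by
              rw [List.contains_cons, beq_iff_eq.mpr (show k + j = v by omega)]
              rfl
            rw [he]
            rfl
          · rw [if_neg h1, if_neg h2]
            have hv : k + j ≠ v := by omega
            rw [show k - 1 + (j + 1) = k + j by ring, List.contains_cons,
              beq_eq_false_iff_ne.mpr hv, Bool.false_or])

-- A's first loop: two appends under the guard build the flat pair list of matched indices
theorem foldl_if_append_pair (R : List Int) (M : Int → Bool) (acc : List Int) :
    R.foldl (fun acc i => if M i then (acc ++ [i]) ++ [i + 1] else acc) acc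
      = acc ++ (R.filter M).flatMap (fun i => [i, i + 1]) := by
  induction R generalizing acc with
  | nil => simp
  | cons r t ih =>
      rw [List.foldl_cons]
      by_cases h : M r
      · rw [if_pos h, ih, List.filter_cons_of_pos h, List.flatMap_cons]
        simp [List.append_assoc]
      · rw [if_neg h, ih, List.filter_cons_of_neg h]

theorem pairwise_flatMap_pair (F : List Int) (h : F.Pairwise (fun a b => a + 2 ≤ b)) :
    (F.flatMap (fun i => [i, i + 1])).Pairwise (· < ·) := by
  induction F with
  | nil => simp
  | cons i t ih =>
      simp only [List.flatMap_cons]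
      have hall := (List.pairwise_cons.mp h).1
      refine List.pairwise_append.mpr ⟨by simp, ih h.of_cons, ?_⟩
      intro a ha b hb
      obtain ⟨w, hw, hbw⟩ := List.mem_flatMap.mp hb
      have := hall w hw
      simp only [List.mem_cons, List.not_mem_nil, or_false] at ha hbw
      rcases ha with rfl | rfl <;> rcases hbw with rfl | rfl <;> omega

theorem mem_flatMap_pair (F : List Int) (k : Int) :
    k ∈ F.flatMap (fun i => [i, i + 1]) ↔ k ∈ F ∨ k - 1 ∈ F := by
  rw [List.mem_flatMap]
  constructor
  · rintro ⟨i, hi, hk⟩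
    simp only [List.mem_cons, List.not_mem_nil, or_false] at hk
    rcases hk with rfl | rfl
    · exact Or.inl hi
    · exact Or.inr (by simpa using hi)
  · rintro (h | h)
    · exact ⟨k, h, by simp⟩
    · refine ⟨k - 1, h, ?_⟩
      rw [show k - 1 + 1 = k from by ring]
      simp

-- B's enumerate-filter-map is an index filter
theorem filter_enumerate_keepIdx {α : Type} (p : Int → Bool) (l : List α) (s : Int) :
    ((PySem.List.enumerate l s).filter (fun kc => p kc.1)).map (·.2)
      = keepIdx (fun k => p (k + s)) l := by
  induction l generalizing s with
  | nil => rfl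
  | cons a t ih =>
      rw [PySem.List.enumerate_cons, List.filter_cons]
      by_cases h : p s
      · rw [if_pos (by simpa using h), List.map_cons, ih (s + 1)]
        simp only [keepIdx]
        simp only [zero_add, h, if_true]
        simp only [List.singleton_append, List.cons.injEq, true_and]
        exact keepIdx_congr t (fun k hk => by congr 1; ring)
      · rw [if_neg (by simpa using h), ih (s + 1)]
        simp only [keepIdx]
        simp only [zero_add, if_neg h, List.nil_append]
        exact keepIdx_congr t (fun k hk => by congr 1; ring)

-- ===== VERDICT (by name: the statement is the Claim_ definition above) =====
theorem descodificar_spec : Claim_equal_descodificar := by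
  intro cod _ hpre
  unfold Spec_descodificar descodificar descodificar_alt
  dsimp only []
  rw [foldl_if_append_pair, List.nil_append]
  -- the shared match predicate and matched-index list
  have hMeq : ∀ i : Int,
      (PySem.Str.pyGet? cod i == some 'p' &&
        PySem.Str.pyGet? cod (i - 1) == PySem.Str.pyGet? cod (i + 1)) = matchAt cod i :=
    fun i => rfl
  rw [Pre_descodificar, List.all_eq_true] at hpre
  set F : List Int :=
    (PySem.List.pyRange 0 (PySem.Str.len cod - 1) 1).filter
      (fun i =>
        PySem.Str.pyGet? cod i == some 'p' &&
        PySem.Str.pyGet? cod (i - 1) == PySem.Str.pyGet? cod (i + 1)) with hF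
  have hmemF : ∀ x : Int, x ∈ F → (0 ≤ x ∧ x < PySem.Str.len cod - 1) ∧ matchAt cod x := by
    intro x hx
    obtain ⟨hxR, hxM⟩ := List.mem_filter.mp hx
    exact ⟨PySem.List.mem_pyRange_one.mp hxR, by rw [← hMeq]; exact hxM⟩
  have hgap : F.Pairwise (fun a b => a + 2 ≤ b) := by
    refine List.Pairwise.imp_of_mem ?_
      ((PySem.List.pairwise_lt_pyRange_one 0 (PySem.Str.len cod - 1)).filter _)
    intro a b ha hb hab
    obtain ⟨⟨ha0, haU⟩, haM⟩ := hmemF a ha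
    obtain ⟨⟨hb0, hbU⟩, hbM⟩ := hmemF b hb
    by_contra hcon
    have hb1 : b = a + 1 := by omega
    have := hpre a (PySem.List.mem_pyRange_one.mpr ⟨ha0, by omega⟩)
    rw [Bool.not_eq_eq_eq_not, Bool.not_true, Bool.and_eq_false_iff] at this
    rcases this with h | h
    · rw [haM] at h; exact absurd h (by simp)
    · rw [← hb1, hbM] at h; exact absurd h (by simp)
  have hsort : (F.flatMap (fun i => [i, i + 1])).Pairwise (· < ·) :=
    pairwise_flatMap_pair F hgap
  have hbound : ∀ v ∈ F.flatMap (fun i => [i, i + 1]),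
      (0 : Int) ≤ v ∧ v < 0 + (cod.toList.length : Int) := by
    intro v hv
    have hlen := PySem.Str.len_eq cod
    rcases (mem_flatMap_pair F v).mp hv with h | h
    · have := (hmemF v h).1; omega
    · have := (hmemF (v - 1) h).1; omega
  rw [pops_spec _ _ _ hsort hbound]
  rw [filter_enumerate_keepIdx
    (fun k => !(PySem.Set.contains (PySem.Set.ofList F) k) &&
              !(PySem.Set.contains (PySem.Set.ofList F) (k - 1))) cod.toList 0]
  have hS : ∀ x : Int, PySem.Set.contains (PySem.Set.ofList F) x = F.contains x := by
    intro x
    rw [Bool.eq_iff_iff, PySem.Set.contains_iff, List.contains_iff_mem, PySem.Set.mem_ofList]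
  congr 1
  exact keepIdx_congr cod.toList (fun k hk => by
    have h2 : (F.flatMap (fun i => [i, i + 1])).contains (k + 0) =
        (F.contains (k + 0) || F.contains (k + 0 - 1)) := by
      rw [Bool.eq_iff_iff, List.contains_iff_mem, mem_flatMap_pair, Bool.or_eq_true,
        List.contains_iff_mem, List.contains_iff_mem]
    rw [h2, Bool.not_or, hS, hS])
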